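-- pv_equiv track=rewrite | github.com/seanrcollings/school | cs1400/cs1400-demo-code/Demo36-MultidimensionalLists/using.py | max_col_sum
-- ===== SOURCE A (Python) =====
-- def max_col_sum(lst):
--     curr_max_col = -1
--     curr_max_sum = -1
--     for j in range(len(lst[0])):
--         col_sum = 0
--         for i in range(len(lst)):
--             col_sum += lst[i][j]
--
--         if col_sum > curr_max_sum:
--             curr_max_sum = col_sum
--             curr_max_col = j
--
--     return curr_max_col, curr_max_sum
-- ===== SOURCE B (Python) =====
-- def max_col_sum(lst):
--     m = len(lst[0])
--     sums = [0] * m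
--     for row in lst:
--         for j in range(m):
--             sums[j] += row[j]
--     curr_max_col = -1
--     curr_max_sum = -1
--     for j in range(m):
--         if sums[j] > curr_max_sum:
--             curr_max_col = j
--             curr_max_sum = sums[j]
--     return curr_max_col, curr_max_sum
-- ===== Notes on version B (the rewrite author's own statement) =====
-- stated objective: alternative
-- what changed: B replaces A's interleaved per-column rescans (for each column, scan all rows) by a single row-major pass that maintains a full table of column sums, followed by a separate selection pass over that table with the same -1 sentinel and strict > tie-breaking.
import Mathlib
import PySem

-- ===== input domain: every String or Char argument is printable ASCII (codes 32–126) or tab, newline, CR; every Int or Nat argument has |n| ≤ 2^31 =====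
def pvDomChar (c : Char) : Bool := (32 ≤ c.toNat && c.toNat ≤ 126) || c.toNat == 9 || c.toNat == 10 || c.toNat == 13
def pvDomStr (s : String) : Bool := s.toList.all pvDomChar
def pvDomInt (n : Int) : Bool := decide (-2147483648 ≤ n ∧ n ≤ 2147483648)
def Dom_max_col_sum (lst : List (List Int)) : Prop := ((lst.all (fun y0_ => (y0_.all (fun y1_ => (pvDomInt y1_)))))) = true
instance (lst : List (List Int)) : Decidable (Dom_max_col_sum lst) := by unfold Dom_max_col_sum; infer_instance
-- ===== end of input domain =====

-- B computes a table of per-column sums in one row-major pass, then selects the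
-- maximal column in a separate pass; A rescans all rows once per column.
-- Indexing uses getD defaults; under Pre_ every access is in range, so the
-- defaults are never reached and each port computes exactly its Python.

-- ===== PORT A =====
def max_col_sum (lst : List (List Int)) : Int × Int :=
  (List.range (lst.headD []).length).foldl
    (fun st j =>
      let colSum : Int :=
        (List.range lst.length).foldl (fun s i => s + (lst.getD i []).getD j 0) 0
      if colSum > st.2 then ((j : Int), colSum) else st)
    (-1, -1)

-- ===== PORT B =====
def max_col_sum_alt (lst : List (List Int)) : Int × Int :=
  let m := (lst.headD []).length
  let sums : List Int :=
    lst.foldl (fun sums row => (List.range m).map (fun j => sums.getD j 0 + row.getD j 0))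
      (List.replicate m 0)
  (List.range m).foldl
    (fun st j => if sums.getD j 0 > st.2 then ((j : Int), sums.getD j 0) else st)
    (-1, -1)

-- ===== PRECONDITION & SPEC =====
-- Pre_ excludes exactly the inputs on which the Python A raises IndexError:
-- the empty list (lst[0]) and ragged inputs with a row shorter than row 0.
def Pre_max_col_sum (lst : List (List Int)) : Prop :=
  lst ≠ [] ∧ ∀ row ∈ lst, (lst.headD []).length ≤ row.length
instance (lst : List (List Int)) : Decidable (Pre_max_col_sum lst) := by
  unfold Pre_max_col_sum; infer_instance
def pvWitness_max_col_sum : List (List Int) := [[1, 2], [3, 4]]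

def Spec_max_col_sum (lst : List (List Int)) (out : Int × Int) : Prop := out = max_col_sum_alt lst
instance (lst : List (List Int)) (out : Int × Int) : Decidable (Spec_max_col_sum lst out) := by unfold Spec_max_col_sum; infer_instance

-- ===== CLAIM (what is proved, stated in full; the proofs are below) =====
def Claim_equal_max_col_sum : Prop := ∀ (lst : List (List Int)), Dom_max_col_sum lst → Pre_max_col_sum lst → Spec_max_col_sum lst (max_col_sum lst)

-- ===== LEMMAS AND PROOFS =====

-- A's inner index loop over rows equals a fold over the rows themselves.
theorem pv_colsum_index_eq (rows : List (List Int)) (j : Nat) (s0 : Int) :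
    (List.range rows.length).foldl (fun s i => s + (rows.getD i []).getD j 0) s0
      = rows.foldl (fun s row => s + row.getD j 0) s0 := by
  induction rows generalizing s0 with
  | nil => simp
  | cons r t ih =>
      simp only [List.length_cons, List.range_succ_eq_map, List.foldl_cons, List.foldl_map]
      simpa using ih (s0 + r.getD j 0)

-- B's sums table, read at j < m, is the column-j partial sum.
theorem pv_sums_getD (m : Nat) (rows : List (List Int)) (init : List Int) (j : Nat)
    (hj : j < m) :
    (rows.foldl (fun sums row => (List.range m).map (fun j => sums.getD j 0 + row.getD j 0)) init).getD j 0
      = rows.foldl (fun s row => s + row.getD j 0) (init.getD j 0) := by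
  induction rows generalizing init with
  | nil => simp
  | cons r t ih =>
      simp only [List.foldl_cons]
      rw [ih]
      congr 1
      rw [List.getD_eq_getElem?_getD]
      simp [hj]

theorem max_col_sum_eq_alt (lst : List (List Int)) :
    max_col_sum lst = max_col_sum_alt lst := by
  unfold max_col_sum max_col_sum_alt
  apply PySem.List.foldl_congr_mem
  intro st j hj
  have hjm : j < (lst.headD []).length := List.mem_range.mp hj
  rw [pv_colsum_index_eq, pv_sums_getD _ _ _ _ hjm]
  simp

-- ===== VERDICT (by name: the statement is the Claim_ definition above) =====
theorem max_col_sum_spec : Claim_equal_max_col_sum := by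
  intro lst _ _
  unfold Spec_max_col_sum
  exact max_col_sum_eq_alt lst
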